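-- pv_equiv track=rewrite | github.com/chris-risk/dominos | dominos.py | get_snake
-- ===== SOURCE A (Python) =====
-- def get_snake(set):
--     snake = []
--
--     for n in set:
--         if n[0] == n[1]:
--             if len(snake) == 0:
--                 snake.append(n)
--             elif n > snake[0]:
--                 snake[0] = n
--     return snake
-- ===== SOURCE B (Python) =====
-- def get_snake(set):
--     # Filter-then-reduce: collect the doubles, then take the maximum (by pips) if any.
--     doubles = [n for n in set if n[0] == n[1]]
--     return [max(doubles, key=lambda n: n[0])] if doubles else []
-- ===== Notes on version B (the rewrite author's own statement) =====
-- stated objective: idiomatic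
-- what changed: Replaced A's single-pass running-max loop that mutates snake[0] with a filter comprehension over the doubles followed by a separate max reduction.
import Mathlib
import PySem

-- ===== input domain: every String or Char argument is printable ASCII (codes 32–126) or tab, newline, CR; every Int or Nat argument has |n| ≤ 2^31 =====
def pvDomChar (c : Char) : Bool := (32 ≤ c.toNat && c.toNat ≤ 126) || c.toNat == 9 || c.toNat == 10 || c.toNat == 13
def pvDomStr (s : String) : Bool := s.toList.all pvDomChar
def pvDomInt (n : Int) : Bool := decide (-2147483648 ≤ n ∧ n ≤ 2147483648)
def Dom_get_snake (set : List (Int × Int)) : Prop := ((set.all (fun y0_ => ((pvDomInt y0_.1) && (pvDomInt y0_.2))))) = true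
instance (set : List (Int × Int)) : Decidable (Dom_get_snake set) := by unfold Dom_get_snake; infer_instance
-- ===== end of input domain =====

-- B replaces A's running-max accumulator loop with a filter comprehension plus a separate max reduction (idiomatic; same cost).

-- ===== PORT A =====
-- Python tuple comparison 'n > snake[0]' on pairs, ported by hand (exact: lexicographic)
def pyGtPair (a b : Int × Int) : Bool := a.1 > b.1 || (a.1 == b.1 && a.2 > b.2)

def get_snake (set : List (Int × Int)) : List (Int × Int) :=
  set.foldl (fun snake n =>
    if n.1 == n.2 then
      if snake.length == 0 then snake ++ [n]
      else if pyGtPair n (PySem.List.pyGetD snake 0 n) then PySem.List.pySetD snake 0 n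
      else snake
    else snake) []

-- ===== PORT B =====
def get_snake_alt (set : List (Int × Int)) : List (Int × Int) :=
  let doubles := set.filter (fun n => n.1 == n.2)
  match PySem.List.max? doubles (fun n => n.1) with
  | some m => [m]
  | none => []

-- ===== PRECONDITION & SPEC =====
def Spec_get_snake (set : List (Int × Int)) (out : List (Int × Int)) : Prop := out = get_snake_alt set
instance (set : List (Int × Int)) (out : List (Int × Int)) : Decidable (Spec_get_snake set out) := by
  unfold Spec_get_snake; infer_instance

-- ===== CLAIM =====
def Claim_equal_get_snake : Prop := ∀ (set : List (Int × Int)), Dom_get_snake set → Spec_get_snake set (get_snake set)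

-- ===== LEMMAS AND PROOFS =====

-- A's loop body, once the accumulator is a singleton, keeps a singleton running max
lemma loopA_singleton (t : List (Int × Int)) (m : Int × Int) :
    t.foldl (fun snake n =>
      if n.1 == n.2 then
        if snake.length == 0 then snake ++ [n]
        else if pyGtPair n (PySem.List.pyGetD snake 0 n) then PySem.List.pySetD snake 0 n
        else snake
      else snake) [m]
    = [(t.filter (fun n => n.1 == n.2)).foldl (fun m y => if pyGtPair y m then y else m) m] := by
  induction t generalizing m with
  | nil => rfl
  | cons x t ih =>
      by_cases hx : x.1 = x.2
      · simp [List.foldl_cons, hx, PySem.List.pyGetD, PySem.List.pySetD,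
          PySem.List.pySet?]
        split_ifs with h <;> simpa [h] using ih _
      · have hx' : (x.1 == x.2) = false := by simpa using hx
        simp only [List.foldl_cons, List.filter_cons, hx', if_neg, Bool.false_eq_true,
          not_false_eq_true]
        exact ih m

-- max?'s option-valued fold from `some x` is the plain running max
lemma foldl_opt_some {f : Option (Int × Int) → (Int × Int) → Option (Int × Int)}
    (hf : ∀ m y, f (some m) y = if m.1 < y.1 then some y else some m)
    (t : List (Int × Int)) (x : Int × Int) :
    t.foldl f (some x) = some (t.foldl (fun m y => if m.1 < y.1 then y else m) x) := by
  induction t generalizing x with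
  | nil => rfl
  | cons y t ih =>
      rw [List.foldl_cons, hf, List.foldl_cons]
      split_ifs with h
      · exact ih y
      · exact ih x

lemma max?_cons_foldl (x : Int × Int) (t : List (Int × Int)) :
    PySem.List.max? (x :: t) (fun n => n.1)
    = some (t.foldl (fun m y => if m.1 < y.1 then y else m) x) := by
  simp only [PySem.List.max?, List.foldl_cons]
  exact foldl_opt_some (fun m y => rfl) t x

-- on doubles, Python's tuple '>' is just '<' on the first component
lemma foldl_gt_eq_foldl_lt (t : List (Int × Int)) (m : Int × Int)
    (hm : m.1 = m.2) (ht : ∀ y ∈ t, y.1 = y.2) :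
    t.foldl (fun m y => if pyGtPair y m then y else m) m
    = t.foldl (fun m y => if m.1 < y.1 then y else m) m := by
  induction t generalizing m with
  | nil => rfl
  | cons y t ih =>
      have hy : y.1 = y.2 := ht y (by simp)
      have hstep : (if pyGtPair y m then y else m) = (if m.1 < y.1 then y else m) := by
        by_cases h : m.1 < y.1
        · simp [pyGtPair, h]
        · have hb : pyGtPair y m = false := by
            simp only [pyGtPair, Bool.or_eq_false_iff, Bool.and_eq_false_iff,
              decide_eq_false_iff_not, beq_eq_false_iff_ne, ne_eq]
            omega
          simp [hb, h]
      rw [List.foldl_cons, List.foldl_cons, hstep]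
      split_ifs with h
      · exact ih y hy (fun z hz => ht z (by simp [hz]))
      · exact ih m hm (fun z hz => ht z (by simp [hz]))

lemma get_snake_eq (set : List (Int × Int)) : get_snake set = get_snake_alt set := by
  induction set with
  | nil => rfl
  | cons n t ih =>
      by_cases hn : n.1 = n.2
      · have hfilter : ∀ y ∈ t.filter (fun n => n.1 == n.2), y.1 = y.2 := by
          intro y hy
          have := List.of_mem_filter hy
          simpa using this
        simp only [get_snake, get_snake_alt, List.foldl_cons, List.filter_cons]
        simp only [hn, beq_self_eq_true, if_true, List.length_nil,
          List.nil_append]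
        rw [loopA_singleton, max?_cons_foldl, foldl_gt_eq_foldl_lt _ n hn hfilter]
      · simp only [get_snake, get_snake_alt, List.foldl_cons, List.filter_cons] at *
        simpa [hn] using ih

-- ===== VERDICT =====
theorem get_snake_spec : Claim_equal_get_snake := by
  intro set _
  unfold Spec_get_snake
  exact get_snake_eq set
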